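-- pv_equiv track=rewrite | github.com/swcasimiro/my_codewars_answer | 7kyu.py | second_symbol
-- ===== SOURCE A (Python) =====
-- def second_symbol(s, symbol):
--     lst, point = list(s), 0
--
--     for i in range(len(lst)):
--         if lst[i] == symbol:
--             point += 1
--
--         elif point == 2:
--             return i - 1
--
--     return -1
-- ===== SOURCE B (Python) =====
-- def second_symbol(s, symbol):
--     positions = [i for i, c in enumerate(s) if c == symbol]
--     return positions[1] if len(positions) >= 2 else -1
-- ===== Notes on version B (the rewrite author's own statement) =====
-- stated objective: simpler
-- what changed: A's single pass with a running occurrence counter and an early return inside an elif is replaced by collecting the positions of symbol once and returning the second one directly.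
-- intended difference: On strings where symbol occurs at least twice but the second occurrence is the last character or is immediately followed by another occurrence of symbol, A returns -1 (its elif never fires) while B returns the index of the second occurrence, which is the intended answer. — e.g. on second_symbol("aa", "a"): A returns -1, B returns 1
import Mathlib
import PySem

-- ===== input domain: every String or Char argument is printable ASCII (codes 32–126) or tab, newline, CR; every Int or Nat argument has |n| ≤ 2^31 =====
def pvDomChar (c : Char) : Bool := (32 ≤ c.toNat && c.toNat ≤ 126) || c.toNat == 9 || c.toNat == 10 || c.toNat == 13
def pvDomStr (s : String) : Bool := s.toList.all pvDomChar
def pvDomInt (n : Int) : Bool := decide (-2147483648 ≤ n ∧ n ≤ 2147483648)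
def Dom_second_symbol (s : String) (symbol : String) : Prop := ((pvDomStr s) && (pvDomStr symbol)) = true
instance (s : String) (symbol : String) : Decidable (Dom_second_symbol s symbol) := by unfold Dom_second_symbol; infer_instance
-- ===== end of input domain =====

-- B collects the positions of symbol once and returns the second one directly (objective: simpler).
-- Intended difference: where symbol occurs at least twice but the second occurrence is the last
-- character or is immediately followed by another occurrence, A returns -1, B the second index.


-- ===== PORT A =====
-- for i in range(len(lst)): if lst[i] == symbol: point += 1 elif point == 2: return i - 1
def secondSymbolGo (lst : List Char) (symbol : String) (i : Nat) (point : Nat) : Int :=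
  if h : i < lst.length then
    if String.mk [lst[i]] = symbol then secondSymbolGo lst symbol (i + 1) (point + 1)
    else if point = 2 then (i : Int) - 1
    else secondSymbolGo lst symbol (i + 1) point
  else -1
termination_by lst.length - i

def second_symbol (s : String) (symbol : String) : Int :=
  secondSymbolGo s.toList symbol 0 0

-- ===== PORT B =====
-- positions = [i for i, c in enumerate(s) if c == symbol]; positions[1] if len >= 2 else -1
def second_symbol_alt (s : String) (symbol : String) : Int :=
  let positions :=
    ((PySem.List.enumerate s.toList 0).filter (fun p => String.mk [p.2] = symbol)).map (·.1)
  if 2 ≤ positions.length then positions.getD 1 0 else -1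

-- ===== PRECONDITION & SPEC =====
-- index of the second occurrence of symbol in l: the first occurrence, then the first one after it
def pvSecondIdx? (l : List Char) (symbol : String) : Option Nat :=
  (l.findIdx? fun c => decide (String.mk [c] = symbol)).bind fun i =>
    ((l.drop (i + 1)).findIdx? fun c => decide (String.mk [c] = symbol)).map fun k => i + 1 + k

-- On strings where symbol occurs at least twice but the second occurrence is the last character
-- or is immediately followed by another occurrence of symbol, A returns -1 (its elif never
-- fires) while B returns the index of the second occurrence, which is the intended answer.
def D_second_symbol (s : String) (symbol : String) : Prop :=
  ((pvSecondIdx? s.toList symbol).any fun j =>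
    decide (j + 1 = s.toList.length) || decide (String.mk [s.toList.getD (j + 1) ' '] = symbol)) = true
instance (s : String) (symbol : String) : Decidable (D_second_symbol s symbol) := by
  unfold D_second_symbol; infer_instance

def Spec_second_symbol (s : String) (symbol : String) (out : Int) : Prop :=
  ¬ D_second_symbol s symbol → out = second_symbol_alt s symbol
instance (s : String) (symbol : String) (out : Int) : Decidable (Spec_second_symbol s symbol out) := by
  unfold Spec_second_symbol; infer_instance

def pvDiffWitness_second_symbol : String × String := ("aa", "a")
def pvDiffWitnessOut_second_symbol : Int × Int := (-1, 1)

-- ===== CLAIM (what is proved, stated in full; the proofs are below) =====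
def Claim_unchanged_second_symbol : Prop := ∀ (s : String) (symbol : String), Dom_second_symbol s symbol → Spec_second_symbol s symbol (second_symbol s symbol)
def Claim_changed_second_symbol : Prop := Dom_second_symbol (pvDiffWitness_second_symbol.1) (pvDiffWitness_second_symbol.2) ∧ D_second_symbol (pvDiffWitness_second_symbol.1) (pvDiffWitness_second_symbol.2) ∧ second_symbol (pvDiffWitness_second_symbol.1) (pvDiffWitness_second_symbol.2) = pvDiffWitnessOut_second_symbol.1 ∧ second_symbol_alt (pvDiffWitness_second_symbol.1) (pvDiffWitness_second_symbol.2) = pvDiffWitnessOut_second_symbol.2 ∧ pvDiffWitnessOut_second_symbol.1 ≠ pvDiffWitnessOut_second_symbol.2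
def Claim_exact_second_symbol : Prop := ∀ (s : String) (symbol : String), Dom_second_symbol s symbol → D_second_symbol s symbol → second_symbol s symbol ≠ second_symbol_alt s symbol

-- ===== LEMMAS AND PROOFS =====

-- the (absolute) positions at which symbol occurs in l, from offset off (proof-side view of B)
def pvPos (symbol : String) (l : List Char) (off : Int) : List Int :=
  ((PySem.List.enumerate l off).filter (fun p => String.mk [p.2] = symbol)).map (·.1)


-- A's elif-firing result for a candidate second position p
def pvG (symbol : String) (lst : List Char) (p : Int) : Int :=
  if p + 1 < (lst.length : Int) ∧ ¬ String.mk [PySem.List.pyGetD lst (p + 1) ' '] = symbol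
  then p else -1

theorem pvPos_nil (symbol : String) (off : Int) : pvPos symbol [] off = [] := by
  simp [pvPos, PySem.List.enumerate_nil]

theorem pvPos_cons (symbol : String) (c : Char) (t : List Char) (off : Int) :
    pvPos symbol (c :: t) off =
      (if String.mk [c] = symbol then [off] else []) ++ pvPos symbol t (off + 1) := by
  by_cases hm : String.mk [c] = symbol <;>
    simp [pvPos, PySem.List.enumerate_cons, hm]

theorem pvPos_lt (symbol : String) :
    ∀ (l : List Char) (off x : Int), x ∈ pvPos symbol l off → x < off + l.length := by
  intro l
  induction l with
  | nil => intro off x hx; rw [pvPos_nil] at hx; cases hx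
  | cons c t ih =>
    intro off x hx
    rw [pvPos_cons] at hx
    simp only [List.length_cons]
    rcases List.mem_append.mp hx with h | h
    · by_cases hm : String.mk [c] = symbol
      · rw [if_pos hm] at h; simp at h
        subst h; push_cast; omega
      · rw [if_neg hm] at h; cases h
    · have := ih (off + 1) x h; push_cast at this ⊢; omega

theorem pvPos_findIdx (symbol : String) :
    ∀ (l : List Char) (off : Int),
      pvPos symbol l off =
        (match l.findIdx? (fun c => decide (String.mk [c] = symbol)) with
         | none => []
         | some k => (off + (k : Int)) :: pvPos symbol (l.drop (k + 1)) (off + (k : Int) + 1)) := by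
  intro l
  induction l with
  | nil => intro off; simp [pvPos_nil, List.findIdx?_nil]
  | cons c t ih =>
    intro off
    rw [pvPos_cons]
    by_cases hm : String.mk [c] = symbol
    · rw [if_pos hm]
      simp [List.findIdx?_cons, hm]
    · rw [if_neg hm, List.nil_append, ih (off + 1)]
      simp only [List.findIdx?_cons, hm, decide_false]
      cases hft : t.findIdx? (fun c => decide (String.mk [c] = symbol)) with
      | none => simp
      | some k =>
        simp only [Option.map_some, List.drop_succ_cons]
        rw [show off + 1 + (k : Int) = off + ((k + 1 : Nat) : Int) by push_cast; ring]
        simp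

theorem pvGo_ge3 (lst : List Char) (symbol : String) :
    ∀ n i point, lst.length - i = n → 3 ≤ point →
      secondSymbolGo lst symbol i point = -1 := by
  intro n
  induction n with
  | zero =>
    intro i point hn _
    rw [secondSymbolGo]
    simp only [dif_neg (by omega : ¬ i < lst.length)]
  | succ n ih =>
    intro i point hn hp
    rw [secondSymbolGo]
    by_cases hi : i < lst.length
    · simp only [dif_pos hi]
      by_cases hm : String.mk [lst[i]] = symbol
      · rw [if_pos hm]
        exact ih (i + 1) (point + 1) (by omega) (by omega)
      · rw [if_neg hm, if_neg (by omega : ¬ point = 2)]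
        exact ih (i + 1) point (by omega) hp
    · simp only [dif_neg hi]

theorem pvGo_two (lst : List Char) (symbol : String) :
    ∀ n i, lst.length - i = n →
      secondSymbolGo lst symbol i 2 =
        (match (lst.drop i).head? with
         | none => -1
         | some c => if String.mk [c] = symbol then -1 else (i : Int) - 1) := by
  intro n
  induction n with
  | zero =>
    intro i hn
    rw [secondSymbolGo]
    have hge : ¬ i < lst.length := by omega
    simp [dif_neg hge, List.drop_eq_nil_of_le (by omega : lst.length ≤ i)]
  | succ n _ =>
    intro i hn
    rw [secondSymbolGo]
    by_cases hi : i < lst.length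
    · simp only [dif_pos hi]
      rw [List.drop_eq_getElem_cons hi]
      by_cases hm : String.mk [lst[i]] = symbol
      · rw [if_pos hm]
        simp only [List.head?_cons, if_pos hm]
        exact pvGo_ge3 lst symbol (lst.length - (i + 1)) (i + 1) 3 rfl (by omega)
      · rw [if_neg hm]
        simp [List.getElem?_eq_getElem hi, hm]
    · simp only [dif_neg hi]
      simp [List.drop_eq_nil_of_le (by omega : lst.length ≤ i)]

theorem pvGo_one (lst : List Char) (symbol : String) :
    ∀ n i, lst.length - i = n →
      secondSymbolGo lst symbol i 1 =
        (match pvPos symbol (lst.drop i) i with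
         | [] => -1
         | p :: _ => pvG symbol lst p) := by
  intro n
  induction n with
  | zero =>
    intro i hn
    rw [secondSymbolGo]
    have hge : ¬ i < lst.length := by omega
    simp [dif_neg hge, List.drop_eq_nil_of_le (by omega : lst.length ≤ i), pvPos_nil]
  | succ n ih =>
    intro i hn
    rw [secondSymbolGo]
    by_cases hi : i < lst.length
    · simp only [dif_pos hi]
      rw [List.drop_eq_getElem_cons hi, pvPos_cons]
      by_cases hm : String.mk [lst[i]] = symbol
      · rw [if_pos hm]
        simp only [if_pos hm, List.cons_append, List.nil_append]
        rw [pvGo_two lst symbol (lst.length - (i + 1)) (i + 1) rfl, pvG]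
        rcases Nat.lt_or_ge (i + 1) lst.length with h1 | h1
        · rw [List.drop_eq_getElem_cons h1]
          have hget : PySem.List.pyGetD lst ((i : Int) + 1) ' ' = lst[i + 1] := by
            have hc := PySem.List.pyGetD_natCast lst (i + 1) ' '
            rw [show ((i : Int) + 1) = ((i + 1 : Nat) : Int) by push_cast; ring, hc]
            simp [List.getD, List.getElem?_eq_getElem h1]
          rw [hget]
          simp only [List.head?_cons]
          have hlt : (i : Int) + 1 < (lst.length : Int) := by exact_mod_cast h1
          by_cases hm2 : String.mk [lst[i + 1]] = symbol
          · rw [if_pos hm2, if_neg (by tauto)]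
          · rw [if_neg hm2, if_pos ⟨hlt, hm2⟩]
            push_cast; ring
        · rw [List.drop_eq_nil_of_le h1]
          have hnlt : ¬ ((i : Int) + 1 < (lst.length : Int)) := by
            intro h; exact absurd (by exact_mod_cast h) (by omega)
          simp [hnlt]
      · rw [if_neg hm]
        simp only [if_neg hm, List.nil_append]
        rw [show ((i : Int) + 1) = ((i + 1 : Nat) : Int) by push_cast; ring]
        exact ih (i + 1) (by omega)
    · simp only [dif_neg hi]
      simp [List.drop_eq_nil_of_le (by omega : lst.length ≤ i), pvPos_nil]

theorem pvGo_zero (lst : List Char) (symbol : String) :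
    ∀ n i, lst.length - i = n →
      secondSymbolGo lst symbol i 0 =
        (match pvPos symbol (lst.drop i) i with
         | _ :: p :: _ => pvG symbol lst p
         | _ => -1) := by
  intro n
  induction n with
  | zero =>
    intro i hn
    rw [secondSymbolGo]
    have hge : ¬ i < lst.length := by omega
    simp [dif_neg hge, List.drop_eq_nil_of_le (by omega : lst.length ≤ i), pvPos_nil]
  | succ n ih =>
    intro i hn
    rw [secondSymbolGo]
    by_cases hi : i < lst.length
    · simp only [dif_pos hi]
      rw [List.drop_eq_getElem_cons hi, pvPos_cons]
      by_cases hm : String.mk [lst[i]] = symbol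
      · rw [if_pos hm]
        simp only [if_pos hm, List.cons_append, List.nil_append]
        rw [pvGo_one lst symbol (lst.length - (i + 1)) (i + 1) rfl]
        rw [show ((i + 1 : Nat) : Int) = ((i : Int) + 1) by push_cast; ring]
        cases pvPos symbol (lst.drop (i + 1)) ((i : Int) + 1) <;> rfl
      · rw [if_neg hm]
        simp only [if_neg hm, List.nil_append]
        rw [show ((i : Int) + 1) = ((i + 1 : Nat) : Int) by push_cast; ring]
        exact ih (i + 1) (by omega)
    · simp only [dif_neg hi]
      simp [List.drop_eq_nil_of_le (by omega : lst.length ≤ i), pvPos_nil]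

theorem pvA_eq (s : String) (symbol : String) :
    second_symbol s symbol =
      (match pvPos symbol s.toList 0 with
       | _ :: p :: _ => pvG symbol s.toList p
       | _ => -1) := by
  unfold second_symbol
  rw [pvGo_zero s.toList symbol s.toList.length 0 (by omega)]
  simp only [List.drop_zero, Nat.cast_zero]

theorem pvB_eq (s : String) (symbol : String) :
    second_symbol_alt s symbol =
      (if 2 ≤ (pvPos symbol s.toList 0).length then (pvPos symbol s.toList 0).getD 1 0 else -1) := rfl

theorem pvPos_none (symbol : String) (l : List Char) (off : Int)
    (h : l.findIdx? (fun c => decide (String.mk [c] = symbol)) = none) :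
    pvPos symbol l off = [] := by
  rw [pvPos_findIdx, h]

theorem pvPos_some (symbol : String) (l : List Char) (off : Int) (k : Nat)
    (h : l.findIdx? (fun c => decide (String.mk [c] = symbol)) = some k) :
    pvPos symbol l off = (off + (k : Int)) :: pvPos symbol (l.drop (k + 1)) (off + (k : Int) + 1) := by
  rw [pvPos_findIdx, h]

theorem pvD_none1 (s : String) (symbol : String)
    (h1 : s.toList.findIdx? (fun c => decide (String.mk [c] = symbol)) = none) :
    ¬ D_second_symbol s symbol := by
  simp [D_second_symbol, pvSecondIdx?, h1]

theorem pvD_none2 (s : String) (symbol : String) (i : Nat)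
    (h1 : s.toList.findIdx? (fun c => decide (String.mk [c] = symbol)) = some i)
    (h2 : (s.toList.drop (i + 1)).findIdx? (fun c => decide (String.mk [c] = symbol)) = none) :
    ¬ D_second_symbol s symbol := by
  simp [D_second_symbol, pvSecondIdx?, h1, h2]

theorem pvD_iff (s : String) (symbol : String) (i k : Nat)
    (h1 : s.toList.findIdx? (fun c => decide (String.mk [c] = symbol)) = some i)
    (h2 : (s.toList.drop (i + 1)).findIdx? (fun c => decide (String.mk [c] = symbol)) = some k) :
    D_second_symbol s symbol ↔
      (i + 1 + k + 1 = s.toList.length ∨ String.mk [s.toList.getD (i + 1 + k + 1) ' '] = symbol) := by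
  simp [D_second_symbol, pvSecondIdx?, h1, h2]

-- A's next-character lookup after index m in terms of the Nat-indexed getD used by D_second_symbol
theorem pvNext_eq (l : List Char) (m : Nat) :
    PySem.List.pyGetD l ((m : Int) + 1) ' ' = l.getD (m + 1) ' ' := by
  rw [show ((m : Int) + 1) = ((m + 1 : Nat) : Int) by push_cast; ring]
  exact PySem.List.pyGetD_natCast l (m + 1) ' '

-- ===== VERDICT (by name: the statements are the Claim_ definitions above) =====
theorem second_symbol_spec : Claim_unchanged_second_symbol := by
  intro s symbol _ hD
  rw [pvA_eq, pvB_eq]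
  cases h1 : s.toList.findIdx? (fun c => decide (String.mk [c] = symbol)) with
  | none => rw [pvPos_none symbol s.toList 0 h1]; simp
  | some i =>
    cases h2 : (s.toList.drop (i + 1)).findIdx? (fun c => decide (String.mk [c] = symbol)) with
    | none =>
      rw [pvPos_some symbol s.toList 0 i h1, pvPos_none symbol _ _ h2]
      simp
    | some k =>
      have hmem : ((0 : Int) + (i : Int) + 1 + (k : Int)) ∈ pvPos symbol s.toList 0 := by
        rw [pvPos_some symbol s.toList 0 i h1, pvPos_some symbol _ _ k h2]
        exact List.mem_cons_of_mem _ List.mem_cons_self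
      have hlt := pvPos_lt symbol s.toList 0 _ hmem
      have hD' := (not_iff_not.mpr (pvD_iff s symbol i k h1 h2)).mp hD
      push_neg at hD'
      obtain ⟨hne, hnm⟩ := hD'
      rw [pvPos_some symbol s.toList 0 i h1, pvPos_some symbol _ _ k h2]
      rw [if_pos (by simp)]
      show pvG symbol s.toList ((0 : Int) + (i : Int) + 1 + (k : Int)) = _
      rw [pvG, if_pos ?_]
      · rfl
      refine ⟨?_, ?_⟩
      · have hne' : ((i + 1 + k + 1 : Nat) : Int) ≠ (s.toList.length : Int) := by
          intro h; exact hne (by exact_mod_cast h)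
        push_cast at hne' ⊢
        omega
      · rw [show ((0 : Int) + (i : Int) + 1 + (k : Int)) = ((i + 1 + k : Nat) : Int) by push_cast; ring,
          pvNext_eq]
        exact hnm

theorem second_symbol_changed : Claim_changed_second_symbol := by
  unfold Claim_changed_second_symbol
  refine ⟨by decide, by decide, ?_, by decide, by decide⟩
  show second_symbol "aa" "a" = -1
  rw [pvA_eq]
  decide

theorem second_symbol_tight : Claim_exact_second_symbol := by
  intro s symbol _ hD
  rw [pvA_eq, pvB_eq]
  cases h1 : s.toList.findIdx? (fun c => decide (String.mk [c] = symbol)) with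
  | none => exact absurd hD (pvD_none1 s symbol h1)
  | some i =>
    cases h2 : (s.toList.drop (i + 1)).findIdx? (fun c => decide (String.mk [c] = symbol)) with
    | none => exact absurd hD (pvD_none2 s symbol i h1 h2)
    | some k =>
      have hD' := (pvD_iff s symbol i k h1 h2).mp hD
      have hmem : ((0 : Int) + (i : Int) + 1 + (k : Int)) ∈ pvPos symbol s.toList 0 := by
        rw [pvPos_some symbol s.toList 0 i h1, pvPos_some symbol _ _ k h2]
        exact List.mem_cons_of_mem _ List.mem_cons_self
      have hlt := pvPos_lt symbol s.toList 0 _ hmem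
      rw [pvPos_some symbol s.toList 0 i h1, pvPos_some symbol _ _ k h2]
      rw [if_pos (by simp)]
      show pvG symbol s.toList ((0 : Int) + (i : Int) + 1 + (k : Int)) ≠ _
      rw [pvG]
      split_ifs with hg
      · obtain ⟨hl, hm⟩ := hg
        rw [show ((0 : Int) + (i : Int) + 1 + (k : Int)) = ((i + 1 + k : Nat) : Int) by push_cast; ring,
          pvNext_eq] at hm
        exfalso
        rcases hD' with h | h
        · have : ((i + 1 + k + 1 : Nat) : Int) < (s.toList.length : Int) := by push_cast; push_cast at hl; omega
          have hlen2 : i + 1 + k + 1 < s.toList.length := by exact_mod_cast this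
          omega
        · exact hm h
      · intro h
        have hgd : (((0 : Int) + (i : Int)) :: ((0 : Int) + (i : Int) + 1 + (k : Int)) ::
            pvPos symbol ((s.toList.drop (i + 1)).drop (k + 1)) ((0 : Int) + (i : Int) + 1 + (k : Int) + 1)).getD 1 0
            = (0 : Int) + (i : Int) + 1 + (k : Int) := rfl
        rw [hgd] at h
        omega
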